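-- pv_equiv track=rewrite | github.com/yunguks/algostudy | 2022_KAKAO_BLIND_RECRUITMENT.py | solution
-- ===== SOURCE A (Python) =====
-- from collections import deque
--
-- def solution(n, info):
--
--     def cal(a_list,b_list):
--         a = 0
--         b = 0
--         for i in range(len(a_list)):
--             if a_list[i] < b_list[i]:
--                 b += 10-i
--             else:
--                 if a_list[i]>0:
--                     a+=10-i
--         return b-a
--
--     my_info = [0]*len(info)
--
--     max = 0
--
--     answer= [0]*len(info)
--     q = deque()
--     q.append([my_info,0])
--     while q:
--         state, i = q.pop()
--         if i==len(info) or n==sum(state):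
--             m = cal(info,state)
--             if max <= m:
--                 max = m
--                 answer = state
--             continue
--
--         q.append([state ,i+1])
--         if n - sum(state)-(info[i]+1) > -1:
--             new_info = state[:]
--             new_info[i] = info[i]+1
--             q.append([new_info, i+1])
--
--
--     if n > sum(answer):
--         answer[-1] += n-sum(answer)
--     if max >0:
--         return answer
--     else:
--         return [-1]
-- ===== SOURCE B (Python) =====
-- def solution(n, info):
--     L = len(info)
--     best_m = 0
--     best = [0] * L
--
--     def score(state):
--         return sum((10 - i) if a < b else (-(10 - i) if a > 0 else 0)
--                    for i, (a, b) in enumerate(zip(info, state)))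
--
--     def rec(state, i, used):
--         nonlocal best_m, best
--         if i == L or used == n:
--             m = score(state)
--             if best_m <= m:
--                 best_m, best = m, state
--             return
--         need = info[i] + 1
--         if n - used - need >= 0:
--             rec(state[:i] + [need] + state[i + 1:], i + 1, used + need)
--         rec(state, i + 1, used)
--
--     rec([0] * L, 0, 0)
--     if n > sum(best):
--         best = best[:]
--         best[-1] += n - sum(best)
--     return best if best_m > 0 else [-1]
-- ===== Notes on version B (the rewrite author's own statement) =====
-- stated objective: simpler
-- what changed: Replaced the explicit deque-used-as-stack DFS by recursive backtracking over the arena index (same win-first visiting order and keep-last-on-tie rule), carrying the arrows-used count through the recursion instead of re-summing the state at every node, and scoring with a single enumerate(zip(...)) sum instead of the two-accumulator loop.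
import Mathlib
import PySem

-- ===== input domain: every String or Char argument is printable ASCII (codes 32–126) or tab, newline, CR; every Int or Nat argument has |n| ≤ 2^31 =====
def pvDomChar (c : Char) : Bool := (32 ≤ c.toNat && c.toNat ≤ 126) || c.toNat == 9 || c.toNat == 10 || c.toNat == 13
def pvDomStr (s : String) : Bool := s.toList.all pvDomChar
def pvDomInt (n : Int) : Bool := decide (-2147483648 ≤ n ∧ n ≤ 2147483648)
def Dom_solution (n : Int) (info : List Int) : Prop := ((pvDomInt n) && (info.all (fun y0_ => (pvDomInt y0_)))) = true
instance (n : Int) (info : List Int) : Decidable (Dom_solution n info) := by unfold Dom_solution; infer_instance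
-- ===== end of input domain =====

-- B replaces A's explicit deque-stack DFS by recursive backtracking over the arena index
-- (same visiting order: win-branch first), carrying the arrows-used count instead of re-summing,
-- and scoring by a single zip/enumerate sum instead of A's two-accumulator loop. Objective: simpler.


-- ===== PORT A =====
-- A's helper cal(a_list, b_list): two accumulators over range(len(a_list)); returns b - a.
def calA (a b : List Int) : Int :=
  let r := (List.range a.length).foldl
    (fun (ab : Int × Int) i =>
      if a.getD i 0 < b.getD i 0 then (ab.1, ab.2 + (10 - (i : Int)))
      else if a.getD i 0 > 0 then (ab.1 + (10 - (i : Int)), ab.2)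
      else ab) (0, 0)
  r.2 - r.1

-- A's while-loop over the deque used as a stack (head of the list = top of the stack = deque's
-- right end).  The terminal test `i == len(info)` is ported as `len(info) ≤ i` (reachable stack
-- entries always have i ≤ len(info), so the two tests agree on every reachable configuration);
-- `info[i]` is in range on the branch where it is read (i < len(info) there) and ported with getD.
def loopA (n : Int) (info : List Int) :
    List (List Int × Nat) → Int → List Int → Int × List Int
  | [], mx, ans => (mx, ans)
  | (state, i) :: q, mx, ans =>
    if info.length ≤ i ∨ n = state.sum then
      let m := calA info state
      if mx ≤ m then loopA n info q m state else loopA n info q mx ans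
    else
      -- q.append([state, i+1]); if enough arrows: q.append([new_info, i+1]); pop takes the win branch first
      if n - state.sum - (info.getD i 0 + 1) > -1 then
        loopA n info ((state.set i (info.getD i 0 + 1), i + 1) :: (state, i + 1) :: q) mx ans
      else
        loopA n info ((state, i + 1) :: q) mx ans
  termination_by q _ _ => (q.map (fun e => 3 ^ (info.length + 1 - e.2))).sum
  decreasing_by
  all_goals
    simp only [List.map_cons, List.sum_cons, Nat.add_sub_add_right]
    have h1 : 0 < 3 ^ (info.length + 1 - i) := Nat.pow_pos (by omega)
    first
    | omega
    | · have h2 : 0 < 3 ^ (info.length - i) := Nat.pow_pos (by omega)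
        have he : 3 ^ (info.length + 1 - i) = 3 * 3 ^ (info.length - i) := by
          rw [show info.length + 1 - i = (info.length - i) + 1 by omega, pow_succ]; ring
        omega

def solution (n : Int) (info : List Int) : List Int :=
  let my_info := List.replicate info.length (0 : Int)
  let r := loopA n info [(my_info, 0)] 0 (List.replicate info.length (0 : Int))
  let mx := r.1
  let answer := r.2
  -- answer[-1] += n - sum(answer)  (answer is nonempty under Pre_solution when this branch fires)
  let answer := if n > answer.sum then
      answer.set (answer.length - 1) (answer.getD (answer.length - 1) 0 + (n - answer.sum))
    else answer
  if mx > 0 then answer else [-1]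

-- ===== PORT B =====
-- B's score: one pass over enumerate(zip(info, state)).
def scoreB (a b : List Int) : Int :=
  (((a.zip b).zipIdx 0).map (fun p =>
      if p.1.1 < p.1.2 then 10 - (p.2 : Int)
      else if p.1.1 > 0 then -(10 - (p.2 : Int)) else 0)).sum

-- B's rec(state, i, used): win branch first, then skip; accumulator = (best_m, best).
def goB (n : Int) (info : List Int) (state : List Int) (i : Nat) (used : Int)
    (acc : Int × List Int) : Int × List Int :=
  if info.length ≤ i ∨ used = n then
    let m := scoreB info state
    if acc.1 ≤ m then (m, state) else acc
  else
    let need := info.getD i 0 + 1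
    let acc' := if n - used - need ≥ 0 then
        goB n info (state.set i need) (i + 1) (used + need) acc
      else acc
    goB n info state (i + 1) used acc'
  termination_by info.length - i
  decreasing_by all_goals omega

def solution_alt (n : Int) (info : List Int) : List Int :=
  let r := goB n info (List.replicate info.length (0 : Int)) 0 0
            (0, List.replicate info.length (0 : Int))
  let best_m := r.1
  let best := r.2
  let best := if n > best.sum then
      best.set (best.length - 1) (best.getD (best.length - 1) 0 + (n - best.sum))
    else best
  if best_m > 0 then best else [-1]

-- ===== PRECONDITION & SPEC =====
-- Pre_ excludes only info = [] with n > 0, where A (and B alike) raises IndexError on answer[-1].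
def Pre_solution (n : Int) (info : List Int) : Prop := info ≠ [] ∨ n ≤ 0
instance (n : Int) (info : List Int) : Decidable (Pre_solution n info) := by
  unfold Pre_solution; infer_instance
def pvWitness_solution : Int × List Int := (5, [2, 1, 1])

def Spec_solution (n : Int) (info : List Int) (out : List Int) : Prop := out = solution_alt n info
instance (n : Int) (info : List Int) (out : List Int) : Decidable (Spec_solution n info out) := by
  unfold Spec_solution; infer_instance

-- ===== CLAIM (what is proved, stated in full; the proofs are below) =====
def Claim_equal_solution : Prop := ∀ (n : Int) (info : List Int), Dom_solution n info → Pre_solution n info → Spec_solution n info (solution n info)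

-- ===== LEMMAS AND PROOFS =====

-- index-aware scoring spec, recursion on both lists
def specScore (k : Int) : List Int → List Int → Int
  | [], _ => 0
  | _, [] => 0
  | x :: xs, y :: ys =>
    (if x < y then 10 - k else if x > 0 then -(10 - k) else 0) + specScore (k + 1) xs ys

theorem scoreB_aux (a : List Int) : ∀ (b : List Int) (k : Nat),
    (((a.zip b).zipIdx k).map (fun p =>
      if p.1.1 < p.1.2 then 10 - (p.2 : Int)
      else if p.1.1 > 0 then -(10 - (p.2 : Int)) else 0)).sum = specScore (k : Int) a b := by
  induction a with
  | nil => intro b k; simp [specScore]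
  | cons x xs ih =>
    intro b k
    cases b with
    | nil => simp [specScore]
    | cons y ys =>
      simp only [List.zip_cons_cons, List.zipIdx_cons, List.map_cons, List.sum_cons, ih ys (k+1),
        specScore]
      push_cast
      ring_nf

theorem calA_aux (a : List Int) : ∀ (b : List Int) (k : Int) (p : Int × Int),
    a.length = b.length →
    (let r := (List.range a.length).foldl
      (fun (ab : Int × Int) i =>
        if a.getD i 0 < b.getD i 0 then (ab.1, ab.2 + (10 - (k + (i : Int))))
        else if a.getD i 0 > 0 then (ab.1 + (10 - (k + (i : Int))), ab.2)
        else ab) p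
     r.2 - r.1) = (p.2 - p.1) + specScore k a b := by
  induction a with
  | nil => intro b k p h; simp [specScore]
  | cons x xs ih =>
    intro b k p h
    cases b with
    | nil => simp at h
    | cons y ys =>
      simp only [List.length_cons, List.range_succ_eq_map, List.foldl_cons, List.foldl_map]
      have step : ∀ (ab : Int × Int) (i : Nat),
          (if (x::xs).getD (i+1) 0 < (y::ys).getD (i+1) 0 then (ab.1, ab.2 + (10 - (k + ((i+1 : Nat) : Int))))
           else if (x::xs).getD (i+1) 0 > 0 then (ab.1 + (10 - (k + ((i+1 : Nat) : Int))), ab.2)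
           else ab)
          = (if xs.getD i 0 < ys.getD i 0 then (ab.1, ab.2 + (10 - ((k+1) + (i : Int))))
             else if xs.getD i 0 > 0 then (ab.1 + (10 - ((k+1) + (i : Int))), ab.2)
             else ab) := by
        intro ab i
        simp only [List.getD_cons_succ]
        push_cast
        ring_nf
      rw [funext fun ab => funext fun i => step ab i]
      rw [ih ys (k+1) _ (by simpa using h)]
      simp only [List.getD_cons_zero, Nat.cast_zero, specScore]
      split_ifs <;> simp <;> ring

theorem cal_eq_score (a b : List Int) (h : a.length = b.length) : calA a b = scoreB a b := by
  have h1 := calA_aux a b 0 (0, 0) h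
  have h2 := scoreB_aux a b 0
  simp only [zero_add] at h1
  unfold calA scoreB
  rw [h1]
  simp only [Nat.cast_zero] at h2
  rw [h2]
  ring

theorem sum_set_of_zero (l : List Int) (i : Nat) (a : Int) (h : i < l.length) (h0 : l.getD i 0 = 0) :
    (l.set i a).sum = l.sum + a := by
  induction l generalizing i with
  | nil => simp at h
  | cons x xs ih =>
    cases i with
    | zero => simp at h0; simp [h0]; ring
    | succ m => simp at h h0 ⊢; rw [ih m (by omega) h0]; ring

theorem getD_set_ne (l : List Int) (i j : Nat) (a : Int) (h : i ≠ j) :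
    (l.set i a).getD j 0 = l.getD j 0 := by
  induction l generalizing i j with
  | nil => simp
  | cons x xs ih =>
    cases i <;> cases j <;> simp_all [List.set]

theorem loop_eq_go (n : Int) (info : List Int) :
    ∀ (d : Nat) (state : List Int) (i : Nat) (q : List (List Int × Nat)) (mx : Int) (ans : List Int),
      info.length - i ≤ d →
      state.length = info.length →
      (∀ j, i ≤ j → state.getD j 0 = 0) →
      loopA n info ((state, i) :: q) mx ans =
        loopA n info q (goB n info state i state.sum (mx, ans)).1
          (goB n info state i state.sum (mx, ans)).2 := by
  intro d
  induction d with
  | zero =>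
    intro state i q mx ans hd hlen hz
    have hi : info.length ≤ i := by omega
    rw [loopA, goB]
    rw [if_pos (Or.inl hi), if_pos (Or.inl hi)]
    rw [cal_eq_score info state hlen.symm]
    dsimp only
    split_ifs <;> rfl
  | succ d ih =>
    intro state i q mx ans hd hlen hz
    by_cases hterm : info.length ≤ i ∨ n = state.sum
    · rw [loopA, goB]
      have hterm2 : info.length ≤ i ∨ state.sum = n := by tauto
      rw [if_pos hterm, if_pos hterm2]
      rw [cal_eq_score info state hlen.symm]
      dsimp only
      split_ifs <;> rfl
    · have hi : i < info.length := by
        rcases not_or.mp hterm with ⟨h1, _⟩; omega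
      have hne : ¬ (info.length ≤ i ∨ state.sum = n) := by tauto
      rw [loopA, goB, if_neg hterm, if_neg hne]
      dsimp only
      have hz0 : state.getD i 0 = 0 := hz i (le_refl i)
      by_cases hw : n - state.sum - (info.getD i 0 + 1) > -1
      · rw [if_pos hw, if_pos (show n - state.sum - (info.getD i 0 + 1) ≥ 0 by omega)]
        have hsum : (state.set i (info.getD i 0 + 1)).sum = state.sum + (info.getD i 0 + 1) :=
          sum_set_of_zero state i _ (by omega) hz0
        rw [ih (state.set i (info.getD i 0 + 1)) (i+1) ((state, i+1) :: q) mx ans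
              (by omega) (by simpa using hlen)
              (fun j hj => by rw [getD_set_ne state i j _ (by omega)]; exact hz j (by omega))]
        rw [hsum]
        rw [ih state (i+1) q _ _ (by omega) hlen (fun j hj => hz j (by omega))]
      · rw [if_neg hw, if_neg (show ¬ n - state.sum - (info.getD i 0 + 1) ≥ 0 by omega)]
        rw [ih state (i+1) q mx ans (by omega) hlen (fun j hj => hz j (by omega))]

theorem solution_spec : Claim_equal_solution := by
  intro n info _ _
  unfold Spec_solution solution solution_alt
  dsimp only
  have hz : ∀ j : Nat, 0 ≤ j → (List.replicate info.length (0:Int)).getD j 0 = 0 := by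
    intro j _
    rcases lt_or_ge j info.length with hj | hj
    · rw [List.getD_eq_getElem _ _ (by simpa using hj)]; simp
    · rw [List.getD_eq_default _ _ (by simpa using hj)]
  have h := loop_eq_go n info info.length (List.replicate info.length 0) 0 [] 0
      (List.replicate info.length 0) (by omega) (by simp) hz
  have hs : (List.replicate info.length (0:Int)).sum = 0 := by simp
  rw [hs] at h
  rw [h, loopA]
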